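-- pv_equiv track=rewrite | github.com/fathurp01/indonesia-health-journals-pdf-scraper | jurnal_scraping/spiders/doaj_kesehatan_id.py | _extract_fulltext_url
-- ===== SOURCE A (Python) =====
-- from typing import Any
--
-- def _extract_fulltext_url(links: list[dict[str, Any]]) -> str:
--     for link in links:
--         url = (link.get("url") or "").strip()
--         if not url:
--             continue
--         ltype = (link.get("type") or "").lower()
--         if "fulltext" in ltype:
--             return url
--     # Fallback: any link
--     for link in links:
--         url = (link.get("url") or "").strip()
--         if url:
--             return url
--     return ""
-- ===== SOURCE B (Python) =====
-- def _extract_fulltext_url(links: list[dict[str, str]]) -> str: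
--     fallback = None
--     for link in links:
--         url = (link.get("url") or "").strip()
--         if not url:
--             continue
--         if "fulltext" in (link.get("type") or "").lower():
--             return url
--         if fallback is None:
--             fallback = url
--     return fallback if fallback is not None else ""
-- ===== Notes on version B (the rewrite author's own statement) =====
-- stated objective: simpler
-- what changed: Replaces A's two passes over links (fulltext pass, then fallback pass) by one single pass that short-circuits on a fulltext link while remembering the first non-empty url as the fallback.
import Mathlib
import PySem

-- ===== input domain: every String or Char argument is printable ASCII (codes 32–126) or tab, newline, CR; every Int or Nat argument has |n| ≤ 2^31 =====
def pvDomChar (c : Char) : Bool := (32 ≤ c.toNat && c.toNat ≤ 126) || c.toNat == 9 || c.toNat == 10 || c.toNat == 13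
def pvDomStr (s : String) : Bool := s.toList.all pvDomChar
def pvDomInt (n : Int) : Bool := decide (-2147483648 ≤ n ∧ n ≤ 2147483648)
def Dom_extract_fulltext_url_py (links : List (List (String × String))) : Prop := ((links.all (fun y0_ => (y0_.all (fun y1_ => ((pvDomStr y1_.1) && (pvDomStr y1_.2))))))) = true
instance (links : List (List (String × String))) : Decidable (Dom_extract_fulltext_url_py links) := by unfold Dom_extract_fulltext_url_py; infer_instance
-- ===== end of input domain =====

-- B replaces A's two passes over links (fulltext pass then fallback pass) by one
-- single pass that returns on a fulltext link and remembers the first non-empty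
-- url as the fallback (objective: simpler).


-- ===== PORT A =====
-- (link.get("url") or "").strip(): the only falsy str is "", so `or ""` is `getD ""` exactly.
def pvUrlOf (link : List (String × String)) : String :=
  PySem.Str.strip (((PySem.Dict.mk link).get? "url").getD "")

def pvTypeOf (link : List (String × String)) : String :=
  PySem.Str.lower (((PySem.Dict.mk link).get? "type").getD "")

-- first loop of A: return url of the first non-empty-url link whose type contains "fulltext"
def pvA_fulltextPass : List (List (String × String)) → Option String
  | [] => none
  | link :: rest =>
    let url := pvUrlOf link
    if url = "" then pvA_fulltextPass rest
    else if PySem.Str.isIn "fulltext" (pvTypeOf link) then some url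
    else pvA_fulltextPass rest

-- second loop of A: first non-empty url
def pvA_fallbackPass : List (List (String × String)) → Option String
  | [] => none
  | link :: rest =>
    let url := pvUrlOf link
    if url = "" then pvA_fallbackPass rest else some url

def extract_fulltext_url_py (links : List (List (String × String))) : String :=
  match pvA_fulltextPass links with
  | some url => url
  | none =>
    match pvA_fallbackPass links with
    | some url => url
    | none => ""

-- ===== PORT B =====
-- single pass with a fallback accumulator (None until the first non-empty url)
def pvB_loop : List (List (String × String)) → Option String → String
  | [], fallback => fallback.getD ""
  | link :: rest, fallback =>
    let url := pvUrlOf link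
    if url = "" then pvB_loop rest fallback
    else if PySem.Str.isIn "fulltext" (pvTypeOf link) then url
    else pvB_loop rest (match fallback with | none => some url | some f => some f)

def extract_fulltext_url_py_alt (links : List (List (String × String))) : String :=
  pvB_loop links none

-- ===== PRECONDITION & SPEC =====
def Spec_extract_fulltext_url_py (links : List (List (String × String))) (out : String) : Prop := out = extract_fulltext_url_py_alt links
instance (links : List (List (String × String))) (out : String) : Decidable (Spec_extract_fulltext_url_py links out) := by unfold Spec_extract_fulltext_url_py; infer_instance

-- ===== CLAIM (what is proved, stated in full; the proofs are below) =====
def Claim_equal_extract_fulltext_url_py : Prop := ∀ (links : List (List (String × String))), Dom_extract_fulltext_url_py links → Spec_extract_fulltext_url_py links (extract_fulltext_url_py links)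

-- ===== LEMMAS AND PROOFS =====
-- Invariant of B's loop: a fulltext hit wins; otherwise an already-recorded
-- fallback beats the remaining links' first non-empty url.
theorem pvB_loop_eq (links : List (List (String × String))) (fb : Option String) :
    pvB_loop links fb =
      match pvA_fulltextPass links with
      | some url => url
      | none =>
        match fb with
        | some f => f
        | none => (pvA_fallbackPass links).getD "" := by
  induction links generalizing fb with
  | nil => cases fb <;> simp [pvB_loop, pvA_fulltextPass, pvA_fallbackPass]
  | cons link rest ih =>
    by_cases hu : pvUrlOf link = ""
    · simp only [pvB_loop, pvA_fulltextPass, pvA_fallbackPass, if_pos hu]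
      exact ih fb
    · by_cases hf : PySem.Str.isIn "fulltext" (pvTypeOf link) = true
      · simp only [pvB_loop, pvA_fulltextPass, if_neg hu, if_pos hf]
      · simp only [pvB_loop, pvA_fulltextPass, pvA_fallbackPass, if_neg hu, if_neg hf]
        cases fb with
        | some f => simpa using ih (some f)
        | none => simpa using ih (some (pvUrlOf link))

-- ===== VERDICT (by name: the statement is the Claim_ definition above) =====
theorem extract_fulltext_url_py_spec : Claim_equal_extract_fulltext_url_py := by
  intro links _
  unfold Spec_extract_fulltext_url_py extract_fulltext_url_py extract_fulltext_url_py_alt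
  rw [pvB_loop_eq]
  cases h1 : pvA_fulltextPass links with
  | some u => rfl
  | none => cases h2 : pvA_fallbackPass links <;> simp [Option.getD]
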